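-- pv_equiv track=rewrite | github.com/climu/openstudyroom | tournament/templatetags/tournament_tags.py | rows_distributed
-- ===== SOURCE A (Python) =====
-- def rows_distributed(thelist, n):
--     """
--     Break a list into ``n`` rows, distributing columns as evenly as possible
--     across the rows. For example::
--
--         >>> l = range(10)
--
--         >>> rows_distributed(l, 2)
--         [[0, 1, 2, 3, 4], [5, 6, 7, 8, 9]]
--
--         >>> rows_distributed(l, 3)
--         [[0, 1, 2, 3], [4, 5, 6], [7, 8, 9]]
--
--         >>> rows_distributed(l, 4)
--         [[0, 1, 2], [3, 4, 5], [6, 7], [8, 9]]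
--
--         >>> rows_distributed(l, 5)
--         [[0, 1], [2, 3], [4, 5], [6, 7], [8, 9]]
--
--         >>> rows_distributed(l, 9)
--         [[0, 1], [2], [3], [4], [5], [6], [7], [8], [9]]
--
--         # This filter will always return `n` rows, even if some are empty:
--         >>> rows(range(2), 3)
--         [[0], [1], []]
--     """
--     try:
--         n = int(n)
--         thelist = list(thelist)
--     except (ValueError, TypeError):
--         return [thelist]
--     list_len = len(thelist)
--     split = list_len // n
--
--     remainder = list_len % n
--     offset = 0
--     local_rows = []
--     for i in range(n):
--         if remainder:
--             start, end = (split+1)*i, (split+1)*(i+1)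
--         else:
--             start, end = split*i+offset, split*(i+1)+offset
--         local_rows.append(thelist[start:end])
--         if remainder:
--             remainder -= 1
--             offset += 1
--     return local_rows
-- ===== SOURCE B (Python) =====
-- def rows_distributed(thelist, n):
--     """Same split, but row lengths are computed up front (split+1 for the
--     first `remainder` rows) and the rows are cut off a single iterator --
--     no offset/remainder bookkeeping and no slice-bound arithmetic."""
--     try:
--         n = int(n)
--         thelist = list(thelist)
--     except (ValueError, TypeError):
--         return [thelist]
--     split = len(thelist) // n
--     rem = len(thelist) % n
--     it = iter(thelist)
--     return [[next(it) for _ in range(split + (1 if i < rem else 0))]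
--             for i in range(n)]
-- ===== Notes on version B (the rewrite author's own statement) =====
-- stated objective: simpler
-- what changed: B replaces A's stateful loop (mutable remainder/offset and per-row slice-bound arithmetic) by computing each row's length up front (split+1 for the first remainder rows) and cutting the rows consecutively off a single iterator.
import Mathlib
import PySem

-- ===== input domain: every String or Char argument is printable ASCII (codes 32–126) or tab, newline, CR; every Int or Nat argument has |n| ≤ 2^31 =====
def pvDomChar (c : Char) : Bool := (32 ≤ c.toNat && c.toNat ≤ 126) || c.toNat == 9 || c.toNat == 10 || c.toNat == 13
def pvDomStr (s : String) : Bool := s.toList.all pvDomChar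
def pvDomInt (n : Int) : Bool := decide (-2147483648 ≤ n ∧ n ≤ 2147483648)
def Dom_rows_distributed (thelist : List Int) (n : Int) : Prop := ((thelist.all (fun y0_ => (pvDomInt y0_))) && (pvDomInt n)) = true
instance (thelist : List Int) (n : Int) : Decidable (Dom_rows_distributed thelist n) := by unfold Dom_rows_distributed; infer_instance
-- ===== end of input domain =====

-- B computes each row's length up front and cuts the rows consecutively off the list,
-- instead of A's mutable remainder/offset state and per-row slice-bound arithmetic.

-- ===== PORT A =====
-- A's loop body: state (remainder, offset, local_rows); two `if remainder:` tests as in the Python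
def pvStepA (xs : List Int) (split : Int) (st : Int × Int × List (List Int)) (i : Int) :
    Int × Int × List (List Int) :=
  let remainder := st.1
  let offset := st.2.1
  let se : Int × Int :=
    if remainder ≠ 0 then ((split+1)*i, (split+1)*(i+1))
    else (split*i + offset, split*(i+1) + offset)
  let rows := st.2.2 ++ [PySem.List.slice xs (some se.1) (some se.2)]
  if remainder ≠ 0 then (remainder - 1, offset + 1, rows) else (remainder, offset, rows)

def rows_distributed (thelist : List Int) (n : Int) : List (List Int) :=
  ((PySem.List.pyRange 0 n 1).foldl
      (pvStepA thelist (PySem.Int.floordiv (thelist.length : Int) n))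
      (PySem.Int.mod (thelist.length : Int) n, 0, [])).2.2

-- ===== PORT B =====
-- Source B's comprehension body: state (rest of the iterator, rows built so far)
def pvStepB (split rem : Int) (st : List Int × List (List Int)) (i : Int) :
    List Int × List (List Int) :=
  let k := split + (if i < rem then 1 else 0)
  (st.1.drop k.toNat, st.2 ++ [st.1.take k.toNat])

def rows_distributed_alt (thelist : List Int) (n : Int) : List (List Int) :=
  ((PySem.List.pyRange 0 n 1).foldl
      (pvStepB (PySem.Int.floordiv (thelist.length : Int) n)
               (PySem.Int.mod (thelist.length : Int) n))
      (thelist, [])).2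

-- ===== PRECONDITION & SPEC =====
-- n = 0 makes Python's '//' raise ZeroDivisionError in A (uncaught); excluded.
def Pre_rows_distributed (thelist : List Int) (n : Int) : Prop := n ≠ 0
instance (thelist : List Int) (n : Int) : Decidable (Pre_rows_distributed thelist n) := by unfold Pre_rows_distributed; infer_instance
def pvWitness_rows_distributed : List Int × Int := ([1, 2, 3, 4, 5], 3)

def Spec_rows_distributed (thelist : List Int) (n : Int) (out : List (List Int)) : Prop := out = rows_distributed_alt thelist n
instance (thelist : List Int) (n : Int) (out : List (List Int)) : Decidable (Spec_rows_distributed thelist n out) := by unfold Spec_rows_distributed; infer_instance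

-- ===== CLAIM (what is proved, stated in full; the proofs are below) =====
def Claim_equal_rows_distributed : Prop := ∀ (thelist : List Int) (n : Int), Dom_rows_distributed thelist n → Pre_rows_distributed thelist n → Spec_rows_distributed thelist n (rows_distributed thelist n)

-- ===== LEMMAS AND PROOFS =====

-- the common closed form: row i has length S+1 for i < R, else S, starting at i*S + min i R
def pvRow (xs : List Int) (S R i : Nat) : List Int :=
  (xs.drop (i*S + min i R)).take (if i < R then S+1 else S)

theorem pvA_inv (xs : List Int) (S R : Nat) (k : Nat) :
    List.foldl (pvStepA xs (S : Int)) ((R : Int), 0, []) (PySem.List.pyRange 0 (k : Int) 1)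
    = ((R : Int) - ((min k R : Nat) : Int), ((min k R : Nat) : Int),
       (List.range k).map (pvRow xs S R)) := by
  induction k with
  | zero => simp [PySem.List.pyRange_one_eq_nil]
  | succ k ih =>
    have h1 : ((k+1 : Nat) : Int) = (k : Int) + 1 := by push_cast; ring
    rw [h1, PySem.List.pyRange_one_succ_right (by positivity), List.foldl_append, ih]
    by_cases hlt : k < R
    · have hmin : min k R = k := Nat.min_eq_left hlt.le
      have hmin' : min (k+1) R = k+1 := Nat.min_eq_left hlt
      have hne : (R : Int) - ((min k R : Nat) : Int) ≠ 0 := by rw [hmin]; omega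
      simp only [List.foldl_cons, List.foldl_nil, pvStepA, if_pos hne]
      have e1 : ((S : Int)+1)*(k : Int) = ((k*S + k : Nat) : Int) := by push_cast; ring
      have e2 : ((S : Int)+1)*((k : Int)+1) = ((k*S + k + (S+1) : Nat) : Int) := by push_cast; ring
      rw [e1, e2, PySem.List.slice_natCast]
      simp only [Prod.mk.injEq]
      refine ⟨by rw [hmin, hmin']; push_cast; ring, by rw [hmin, hmin']; push_cast; ring, ?_⟩
      rw [List.range_succ, List.map_append, List.map_cons, List.map_nil]
      congr 2
      simp only [pvRow, hmin, if_pos hlt]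
      congr 1
      omega
    · have hmin : min k R = R := Nat.min_eq_right (Nat.le_of_not_lt hlt)
      have hmin' : min (k+1) R = R := Nat.min_eq_right (by omega)
      have hz : ¬ ((R : Int) - ((min k R : Nat) : Int) ≠ 0) := by rw [hmin]; omega
      simp only [List.foldl_cons, List.foldl_nil, pvStepA, if_neg hz]
      have e1 : (S : Int)*(k : Int) + ((min k R : Nat) : Int) = ((k*S + R : Nat) : Int) := by
        rw [hmin]; push_cast; ring
      have e2 : (S : Int)*((k : Int)+1) + ((min k R : Nat) : Int) = ((k*S + R + S : Nat) : Int) := by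
        rw [hmin]; push_cast; ring
      rw [e1, e2, PySem.List.slice_natCast]
      simp only [Prod.mk.injEq]
      refine ⟨by rw [hmin, hmin'], by rw [hmin, hmin'], ?_⟩
      rw [List.range_succ, List.map_append, List.map_cons, List.map_nil]
      congr 2
      simp only [pvRow, hmin, if_neg hlt]
      congr 1
      omega

theorem pvB_inv (xs : List Int) (S R : Nat) (k : Nat) :
    List.foldl (pvStepB (S : Int) (R : Int)) (xs, []) (PySem.List.pyRange 0 (k : Int) 1)
    = (xs.drop (k*S + min k R), (List.range k).map (pvRow xs S R)) := by
  induction k with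
  | zero => simp [PySem.List.pyRange_one_eq_nil]
  | succ k ih =>
    have h1 : ((k+1 : Nat) : Int) = (k : Int) + 1 := by push_cast; ring
    rw [h1, PySem.List.pyRange_one_succ_right (by positivity), List.foldl_append, ih]
    simp only [List.foldl_cons, List.foldl_nil, pvStepB]
    by_cases hlt : k < R
    · have hmin : min k R = k := Nat.min_eq_left hlt.le
      have hmin' : min (k+1) R = k+1 := Nat.min_eq_left hlt
      rw [if_pos (by exact_mod_cast hlt)]
      have ht : ((S : Int) + 1).toNat = S + 1 := by omega
      simp only [Prod.mk.injEq]
      constructor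
      · rw [ht, List.drop_drop]
        congr 1
        rw [hmin, hmin']; ring
      · rw [List.range_succ, List.map_append, List.map_cons, List.map_nil]
        congr 2
        simp [pvRow, hmin, if_pos hlt, ht]
    · have hmin : min k R = R := Nat.min_eq_right (Nat.le_of_not_lt hlt)
      have hmin' : min (k+1) R = R := Nat.min_eq_right (by omega)
      rw [if_neg (by exact_mod_cast hlt)]
      have ht : ((S : Int) + 0).toNat = S := by omega
      simp only [Prod.mk.injEq]
      constructor
      · rw [ht, List.drop_drop]
        congr 1
        rw [hmin, hmin']; ring
      · rw [List.range_succ, List.map_append, List.map_cons, List.map_nil]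
        congr 2
        simp [pvRow, hmin, if_neg hlt]

-- ===== VERDICT (by name: the statement is the Claim_ definition above) =====
theorem rows_distributed_spec : Claim_equal_rows_distributed := by
  intro thelist n hdom hpre
  unfold Spec_rows_distributed rows_distributed rows_distributed_alt
  unfold Pre_rows_distributed at hpre
  rcases lt_or_gt_of_ne hpre with hn | hn
  · rw [PySem.List.pyRange_one_eq_nil (by omega)]; rfl
  · have hs0 : 0 ≤ PySem.Int.floordiv (thelist.length : Int) n := by
      rw [PySem.Int.floordiv_eq_ediv_of_pos hn]
      exact Int.ediv_nonneg (by positivity) hn.le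
    have hr0 : 0 ≤ PySem.Int.mod (thelist.length : Int) n := PySem.Int.mod_nonneg _ hn
    obtain ⟨S, hS⟩ : ∃ S : Nat, PySem.Int.floordiv (thelist.length : Int) n = (S : Int) :=
      ⟨_, (Int.toNat_of_nonneg hs0).symm⟩
    obtain ⟨R, hR⟩ : ∃ R : Nat, PySem.Int.mod (thelist.length : Int) n = (R : Int) :=
      ⟨_, (Int.toNat_of_nonneg hr0).symm⟩
    obtain ⟨N, hN⟩ : ∃ N : Nat, n = (N : Int) := ⟨_, (Int.toNat_of_nonneg hn.le).symm⟩
    rw [hS, hR, hN, pvA_inv, pvB_inv]
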